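-- pv_equiv track=rewrite | github.com/nermadie/CodeForces_Solutions | EducationalCodeforcesRound169Div2/prob03.py | solve
-- ===== SOURCE A (Python) =====
-- def solve(n, k, a):
--     a.sort()
--     result = 0
--     init = 0
--     if n % 2 == 1:
--         init = 1
--     for i in range(init, n - 1, 2):
--         diff = a[i + 1] - a[i]
--         if diff > k:
--             result += diff - k
--             k = 0
--         else:
--             k = k - diff
--     if init == 1:
--         result += a[0]
--     return result
-- ===== SOURCE B (Python) =====
-- def solve(n, k, a):
--     a.sort()
--     init = n % 2
--     base = a[0] if init else 0
--     if n < 2: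
--         return base
--     # cost of all pairs = alternating signed sum of the paired segment:
--     # each pair contributes (upper - lower), i.e. signs -,+,-,+,... over a[init:n]
--     d = 0
--     sign = -1
--     for v in a[init:n]:
--         d += sign * v
--         sign = -sign
--     return base + max(0, d - k)
-- ===== Notes on version B (the rewrite author's own statement) =====
-- stated objective: alternative
-- what changed: B reformulates the answer without pairing or budget-draining: the total cost of the pairs equals an alternating signed sum (-,+,-,+,...) over the sorted segment a[init:n], computed element-by-element with a flipping sign, then a single clamp max(0, d - k) replaces A's per-pair consumption of k.
import Mathlib
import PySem

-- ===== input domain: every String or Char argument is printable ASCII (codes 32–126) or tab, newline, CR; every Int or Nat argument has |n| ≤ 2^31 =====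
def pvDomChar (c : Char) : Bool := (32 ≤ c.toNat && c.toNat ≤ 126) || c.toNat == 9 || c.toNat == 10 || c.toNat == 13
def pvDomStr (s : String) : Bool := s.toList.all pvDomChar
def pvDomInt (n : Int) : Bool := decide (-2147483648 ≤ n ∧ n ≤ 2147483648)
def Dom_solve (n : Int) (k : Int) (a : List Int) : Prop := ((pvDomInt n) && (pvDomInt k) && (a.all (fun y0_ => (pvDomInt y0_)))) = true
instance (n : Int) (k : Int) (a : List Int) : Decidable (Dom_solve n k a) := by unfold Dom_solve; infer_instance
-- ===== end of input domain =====

-- B replaces A's pair-gap/budget-draining greedy by an alternating signed sum over the sorted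
-- segment a[init:n] followed by a single clamp; both Pythons sort `a` in place (same mutation);
-- the equivalence proved here is about the return value.

-- ===== PORT A =====
def solve (n : Int) (k : Int) (a : List Int) : Int :=
  let s := PySem.List.sorted a (fun x => x) false
  let init : Int := if n % 2 = 1 then 1 else 0
  let st := (PySem.List.pyRange init (n - 1) 2).foldl
    (fun (st : Int × Int) i =>
      let diff := PySem.List.pyGetD s (i + 1) 0 - PySem.List.pyGetD s i 0
      if diff > st.2 then (st.1 + diff - st.2, 0) else (st.1, st.2 - diff)) (0, k)
  if init = 1 then st.1 + PySem.List.pyGetD s 0 0 else st.1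

-- ===== PORT B =====
def solve_alt (n : Int) (k : Int) (a : List Int) : Int :=
  let s := PySem.List.sorted a (fun x => x) false
  let init : Int := n % 2
  let base : Int := if init ≠ 0 then PySem.List.pyGetD s 0 0 else 0
  if n < 2 then base
  else
    let st := (PySem.List.slice s (some init) (some n)).foldl
      (fun (st : Int × Int) v => (st.1 + st.2 * v, -st.2)) (0, -1)
    base + max 0 (st.1 - k)

-- ===== PRECONDITION & SPEC =====
-- Pre_ excludes exactly the inputs where Python A raises IndexError: n exceeding len(a)
-- (the loop reads a[n-1]) or odd n with an empty list (it reads a[0]).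
def Pre_solve (n : Int) (k : Int) (a : List Int) : Prop :=
  n ≤ (a.length : Int) ∧ (n % 2 = 1 → a ≠ [])
instance (n : Int) (k : Int) (a : List Int) : Decidable (Pre_solve n k a) := by
  unfold Pre_solve; infer_instance
def pvWitness_solve : Int × Int × List Int := (5, 3, [4, 1, 7, 2, 9])

def Spec_solve (n : Int) (k : Int) (a : List Int) (out : Int) : Prop := out = solve_alt n k a
instance (n : Int) (k : Int) (a : List Int) (out : Int) : Decidable (Spec_solve n k a out) := by unfold Spec_solve; infer_instance

-- ===== CLAIM (what is proved, stated in full; the proofs are below) =====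
def Claim_equal_solve : Prop := ∀ (n : Int) (k : Int) (a : List Int), Dom_solve n k a → Pre_solve n k a → Spec_solve n k a (solve n k a)

-- ===== LEMMAS AND PROOFS =====

-- The step function of A's loop, on the state (result, remaining budget).
def greedyStep (st : Int × Int) (d : Int) : Int × Int :=
  if d > st.2 then (st.1 + d - st.2, 0) else (st.1, st.2 - d)

-- Loop invariant: after consuming gaps summing to S out of an initial budget k0, A's state is
-- (max 0 (S - k0), max 0 (k0 - S)); the gaps are nonnegative.
theorem greedy_inv (ds : List Int) (h : ∀ d ∈ ds, 0 ≤ d) (k0 : Int) :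
    ∀ S : Int, ds.foldl greedyStep (max 0 (S - k0), max 0 (k0 - S))
      = (max 0 (S + ds.sum - k0), max 0 (k0 - (S + ds.sum))) := by
  induction ds with
  | nil => intro S; simp
  | cons d t ih =>
    intro S
    have hd : 0 ≤ d := h d (by simp)
    have hstep : greedyStep (max 0 (S - k0), max 0 (k0 - S)) d
        = (max 0 (S + d - k0), max 0 (k0 - (S + d))) := by
      unfold greedyStep
      split_ifs with hc <;> (simp only [Prod.mk.injEq]; constructor <;> omega)
    have ht : ∀ x ∈ t, 0 ≤ x := fun x hx => h x (by simp [hx])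
    rw [List.foldl_cons, hstep, ih ht (S + d)]
    simp only [List.sum_cons, Prod.mk.injEq]
    constructor <;> omega

-- A's loop from the real initial state (0, k): for a NONEMPTY gap list it computes max 0 (sum - k).
theorem greedy_closed (ds : List Int) (hne : ds ≠ []) (h : ∀ d ∈ ds, 0 ≤ d) (k : Int) :
    ds.foldl greedyStep (0, k) = (max 0 (ds.sum - k), max 0 (k - ds.sum)) := by
  cases ds with
  | nil => exact absurd rfl hne
  | cons d t =>
    have hd : 0 ≤ d := h d (by simp)
    have hstep : greedyStep (0, k) d = (max 0 (d - k), max 0 (k - d)) := by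
      unfold greedyStep
      split_ifs with hc <;> (simp only [Prod.mk.injEq]; constructor <;> omega)
    have ht : ∀ x ∈ t, 0 ≤ x := fun x hx => h x (by simp [hx])
    rw [List.foldl_cons, hstep, greedy_inv t ht k d]
    simp only [List.sum_cons]

-- On a sorted list, each paired gap read by the loop is nonnegative (indices in range under Pre_).
theorem gaps_nonneg (s : List Int) (hpw : s.Pairwise (fun x y => x ≤ y)) (lo b : Int)
    (h0 : 0 ≤ lo) (hb : b < (s.length : Int)) :
    ∀ i ∈ PySem.List.pyRange lo b 2,
      0 ≤ PySem.List.pyGetD s (i + 1) 0 - PySem.List.pyGetD s i 0 := by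
  intro i him
  have hmem := (PySem.List.mem_pyRange_iff_of_pos (by norm_num : (0:Int) < 2) i).mp him
  have hi0 : 0 ≤ i := le_trans h0 hmem.1
  have hi1 : i + 1 < (s.length : Int) := by omega
  rw [PySem.List.pyGetD_eq_getElem s 0 (by omega) hi1,
      PySem.List.pyGetD_eq_getElem s 0 hi0 (by omega)]
  have hmono := List.pairwise_iff_getElem.mp hpw i.toNat (i + 1).toNat
    (by omega) (by omega) (by omega)
  omega

-- Closed form of A's whole loop over the index range, as A's port literally writes it.
theorem loop_eq (s : List Int) (hpw : s.Pairwise (fun x y => x ≤ y)) (lo b k : Int)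
    (h0 : 0 ≤ lo) (hb : b < (s.length : Int)) :
    ((PySem.List.pyRange lo b 2).foldl (fun (st : Int × Int) i =>
        if PySem.List.pyGetD s (i + 1) 0 - PySem.List.pyGetD s i 0 > st.2
        then (st.1 + (PySem.List.pyGetD s (i + 1) 0 - PySem.List.pyGetD s i 0) - st.2, 0)
        else (st.1, st.2 - (PySem.List.pyGetD s (i + 1) 0 - PySem.List.pyGetD s i 0))) (0, k)).1
    = if PySem.List.pyRange lo b 2 = [] then 0
      else max 0 (((PySem.List.pyRange lo b 2).map
            (fun i => PySem.List.pyGetD s (i + 1) 0 - PySem.List.pyGetD s i 0)).sum - k) := by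
  have hfold : (PySem.List.pyRange lo b 2).foldl (fun (st : Int × Int) i =>
        if PySem.List.pyGetD s (i + 1) 0 - PySem.List.pyGetD s i 0 > st.2
        then (st.1 + (PySem.List.pyGetD s (i + 1) 0 - PySem.List.pyGetD s i 0) - st.2, 0)
        else (st.1, st.2 - (PySem.List.pyGetD s (i + 1) 0 - PySem.List.pyGetD s i 0))) (0, k)
      = ((PySem.List.pyRange lo b 2).map
            (fun i => PySem.List.pyGetD s (i + 1) 0 - PySem.List.pyGetD s i 0)).foldl
          greedyStep (0, k) := by
    rw [List.foldl_map]
    rfl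
  by_cases hnil : PySem.List.pyRange lo b 2 = []
  · simp [hnil]
  · have hneM : (PySem.List.pyRange lo b 2).map
        (fun i => PySem.List.pyGetD s (i + 1) 0 - PySem.List.pyGetD s i 0) ≠ [] := by
      simp [hnil]
    have hnn : ∀ d ∈ (PySem.List.pyRange lo b 2).map
        (fun i => PySem.List.pyGetD s (i + 1) 0 - PySem.List.pyGetD s i 0), 0 ≤ d := by
      intro d hd
      obtain ⟨i, him, rfl⟩ := List.mem_map.mp hd
      exact gaps_nonneg s hpw lo b h0 hb i him
    rw [hfold, greedy_closed _ hneM hnn k, if_neg hnil]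

-- The step-2 index range written as a plain List.range.
theorem pyRange_two (lo : Int) (m : Nat) :
    PySem.List.pyRange lo (lo + 2 * m - 1) 2
      = (List.range m).map (fun j : Nat => lo + 2 * (j : Int)) := by
  rw [PySem.List.pyRange_of_pos _ _ (by norm_num : (0:Int) < 2)]
  rcases Nat.eq_zero_or_pos m with hm | hm
  · subst hm; simp
  · rw [if_pos (by omega)]
    have hcount : ((lo + 2 * m - 1 - lo + 2 - 1) / 2).toNat = m := by omega
    rw [hcount]

-- B's alternating-sign fold over the paired segment equals the sum of the paired gaps.
theorem alt_gaps (s : List Int) (m : Nat) : ∀ (lo acc : Int), 0 ≤ lo → lo + 2 * m ≤ (s.length : Int) →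
    ((List.take (2 * m) (List.drop lo.toNat s)).foldl
        (fun (st : Int × Int) v => (st.1 + st.2 * v, -st.2)) (acc, -1)).1
    = acc + (((List.range m).map (fun j : Nat => lo + 2 * (j : Int))).map
        (fun i => PySem.List.pyGetD s (i + 1) 0 - PySem.List.pyGetD s i 0)).sum := by
  induction m with
  | zero => intro lo acc _ _; simp
  | succ m ih =>
    intro lo acc h0 hlen
    have hlt0 : lo.toNat < s.length := by omega
    have hlt1 : lo.toNat + 1 < s.length := by omega
    have htake : List.take (2 * (m + 1)) (List.drop lo.toNat s)
        = s[lo.toNat] :: s[lo.toNat + 1] :: List.take (2 * m) (List.drop (lo + 2).toNat s) := by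
      rw [show (lo + 2).toNat = lo.toNat + 1 + 1 from by omega,
          List.drop_eq_getElem_cons hlt0, List.drop_eq_getElem_cons hlt1,
          show 2 * (m + 1) = (2 * m + 1) + 1 from by ring,
          List.take_succ_cons, List.take_succ_cons]
    rw [htake]
    have hfold2 : (s[lo.toNat] :: s[lo.toNat + 1] :: List.take (2 * m) (List.drop (lo + 2).toNat s)).foldl
          (fun (st : Int × Int) v => (st.1 + st.2 * v, -st.2)) (acc, -1)
        = (List.take (2 * m) (List.drop (lo + 2).toNat s)).foldl
          (fun (st : Int × Int) v => (st.1 + st.2 * v, -st.2))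
          ((acc - s[lo.toNat] + s[lo.toNat + 1]), -1) := by
      have hacc : acc + -1 * s[lo.toNat] + 1 * s[lo.toNat + 1]
          = acc - s[lo.toNat] + s[lo.toNat + 1] := by ring
      simp only [List.foldl_cons, neg_neg, hacc]
    rw [hfold2, ih (lo + 2) _ (by omega) (by push_cast at hlen ⊢; omega)]
    rw [List.range_succ_eq_map]
    simp only [List.map_cons, List.map_map, List.sum_cons]
    have hga : PySem.List.pyGetD s (lo + 2 * ((0:Nat) : Int) + 1) 0 = s[lo.toNat + 1] := by
      rw [PySem.List.pyGetD_eq_getElem s 0 (by omega) (by push_cast; omega)]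
      congr 1; omega
    have hgb : PySem.List.pyGetD s (lo + 2 * ((0:Nat) : Int)) 0 = s[lo.toNat] := by
      rw [PySem.List.pyGetD_eq_getElem s 0 (by omega) (by push_cast; omega)]
      congr 1; omega
    push_cast at hga hgb ⊢
    rw [hga, hgb]
    have hmapeq : (List.range m).map
          ((fun i => PySem.List.pyGetD s (i + 1) 0 - PySem.List.pyGetD s i 0)
            ∘ (fun j : Nat => lo + 2 * (j : Int)) ∘ Nat.succ)
        = (List.range m).map
          ((fun i => PySem.List.pyGetD s (i + 1) 0 - PySem.List.pyGetD s i 0)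
            ∘ fun j : Nat => lo + 2 + 2 * (j : Int)) := by
      apply List.map_congr_left
      intro j _
      simp only [Function.comp_apply]
      have harg : lo + 2 * ((Nat.succ j : Nat) : Int) = lo + 2 + 2 * (j : Int) := by
        push_cast
        ring
      rw [harg]
    rw [hmapeq]
    ring

-- ===== VERDICT (by name: the statement is the Claim_ definition above) =====
theorem solve_spec : Claim_equal_solve := by
  intro n k a _ hpre
  obtain ⟨hlen, hodd⟩ := hpre
  unfold Spec_solve
  simp only [solve, solve_alt]
  have hpw : (PySem.List.sorted a (fun x => x) false).Pairwise (fun x y => x ≤ y) :=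
    PySem.List.sorted_pairwise a (fun x => x)
  set s := PySem.List.sorted a (fun x => x) false with hs
  have hslen : ((s.length : Int)) = (a.length : Int) := by
    simp [hs, PySem.List.length_sorted]
  have hmod : n % 2 = 0 ∨ n % 2 = 1 := by omega
  by_cases hsmall : n < 2
  · -- no pairs: A's loop range is empty, B takes its guard branch
    have hnil : ∀ lo : Int, ¬ (lo < n - 1) → PySem.List.pyRange lo (n - 1) 2 = [] := by
      intro lo hnb
      rw [PySem.List.pyRange_of_pos _ _ (by norm_num : (0:Int) < 2), if_neg hnb]
      simp
    rw [if_pos hsmall]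
    rcases hmod with h0 | h1
    · rw [if_neg (by omega : ¬ n % 2 = 1),
          loop_eq s hpw 0 (n - 1) k (by omega) (by omega),
          if_pos (hnil 0 (by omega))]
      simp [h0]
    · rw [if_pos h1, loop_eq s hpw 1 (n - 1) k (by omega) (by omega),
          if_pos (hnil 1 (by omega))]
      simp [h1]
  · -- n ≥ 2: both sides reduce to base + max 0 (gap-sum − k)
    rw [if_neg hsmall]
    obtain ⟨m, hm⟩ : ∃ m : Nat, n = n % 2 + 2 * m := ⟨((n - n % 2) / 2).toNat, by omega⟩
    have hmpos : 0 < m := by omega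
    have hsl : PySem.List.slice s (some (n % 2)) (some n)
        = List.take (2 * m) (List.drop (n % 2).toNat s) := by
      rw [PySem.List.slice_toNat s (by omega) (by omega)]
      congr 1
      omega
    have halt := alt_gaps s m (n % 2) 0 (by omega) (by omega)
    have hrw : PySem.List.pyRange (n % 2) (n - 1) 2
        = (List.range m).map (fun j : Nat => n % 2 + 2 * (j : Int)) := by
      rw [show n - 1 = n % 2 + 2 * m - 1 from by omega]
      exact pyRange_two (n % 2) m
    have hrne : PySem.List.pyRange (n % 2) (n - 1) 2 ≠ [] := by
      rw [hrw]
      cases m with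
      | zero => omega
      | succ m' => simp
    rcases hmod with h0 | h1
    · -- even n
      rw [h0] at hrw hrne hsl halt
      rw [if_neg (by omega : ¬ n % 2 = 1),
          loop_eq s hpw 0 (n - 1) k (by omega) (by omega), if_neg hrne, hrw]
      rw [h0, hsl, if_neg (by norm_num : ¬ (0:Int) ≠ 0), halt]
      omega
    · -- odd n
      rw [h1] at hrw hrne hsl halt
      rw [if_pos h1, loop_eq s hpw 1 (n - 1) k (by omega) (by omega), if_neg hrne, hrw]
      rw [h1, hsl, if_pos (by norm_num : (1:Int) ≠ 0), halt]
      omega
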